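-- pv_equiv track=rewrite | github.com/basicallysource/sorter-v2 | software/sorter/backend/scripts/benchmark_tracker_replay.py | _gap_count
-- ===== SOURCE A (Python) =====
-- def _gap_count(ids: list[int | None]) -> int:
--     gaps = 0
--     seen_before = False
--     in_gap = False
--     for value in ids:
--         if value is None:
--             if seen_before and not in_gap:
--                 gaps += 1
--                 in_gap = True
--             continue
--         seen_before = True
--         in_gap = False
--     return gaps
-- ===== SOURCE B (Python) =====
-- def _gap_count(ids: list[int | None]) -> int:
--     return sum(1 for prev, cur in zip(ids, ids[1:])
--                if prev is not None and cur is None)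
-- ===== Notes on version B (the rewrite author's own statement) =====
-- stated objective: simpler
-- what changed: Replaces the seen_before/in_gap state machine with a stateless count of falling edges (non-None followed by None) over adjacent pairs.
import Mathlib
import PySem

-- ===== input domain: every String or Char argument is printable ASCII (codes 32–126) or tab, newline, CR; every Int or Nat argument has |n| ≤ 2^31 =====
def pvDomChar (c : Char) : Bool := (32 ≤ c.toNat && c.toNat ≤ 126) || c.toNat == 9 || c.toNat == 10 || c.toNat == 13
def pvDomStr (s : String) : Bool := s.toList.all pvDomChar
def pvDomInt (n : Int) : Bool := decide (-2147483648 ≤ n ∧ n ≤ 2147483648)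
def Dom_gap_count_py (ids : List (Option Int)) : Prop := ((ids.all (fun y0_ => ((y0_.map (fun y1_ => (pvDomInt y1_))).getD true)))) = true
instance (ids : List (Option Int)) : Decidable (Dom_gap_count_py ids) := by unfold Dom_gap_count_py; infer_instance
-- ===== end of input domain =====

-- B replaces A's seen_before/in_gap state machine by a stateless count of
-- falling edges (non-None followed by None) over adjacent pairs; same O(n) cost.

-- ===== PORT A =====
-- state = (gaps, seen_before, in_gap), exactly A's loop
def pvStepA (st : Int × Bool × Bool) (value : Option Int) : Int × Bool × Bool :=
  match value with
  | none => if st.2.1 && !st.2.2 then (st.1 + 1, st.2.1, true) else st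
  | some _ => (st.1, true, false)

def gap_count_py (ids : List (Option Int)) : Int :=
  (ids.foldl pvStepA (0, false, false)).1

-- ===== PORT B =====
-- sum(1 for prev, cur in zip(ids, ids[1:]) if prev is not None and cur is None)
def gap_count_py_alt (ids : List (Option Int)) : Int :=
  (((ids.zip (PySem.List.slice ids (some 1) none)).countP
      (fun p => p.1.isSome && p.2.isNone) : Nat) : Int)

-- ===== PRECONDITION & SPEC =====
def Spec_gap_count_py (ids : List (Option Int)) (out : Int) : Prop := out = gap_count_py_alt ids
instance (ids : List (Option Int)) (out : Int) : Decidable (Spec_gap_count_py ids out) := by unfold Spec_gap_count_py; infer_instance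

-- ===== CLAIM (what is proved, stated in full; the proofs are below) =====
def Claim_equal_gap_count_py : Prop := ∀ (ids : List (Option Int)), Dom_gap_count_py ids → Spec_gap_count_py ids (gap_count_py ids)

-- ===== LEMMAS AND PROOFS =====

-- falling-edge count with a single carried bit: "would a None here open a gap"
def pvEdges : Bool → List (Option Int) → Int
  | _, [] => 0
  | c, none :: rest => (if c then 1 else 0) + pvEdges false rest
  | _, some _ :: rest => pvEdges true rest

theorem pvFoldA (ids : List (Option Int)) :
    ∀ (gaps : Int) (seen ingap : Bool),
    (ids.foldl pvStepA (gaps, seen, ingap)).1 = gaps + pvEdges (seen && !ingap) ids := by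
  induction ids with
  | nil => intro gaps seen ingap; simp [pvEdges]
  | cons x rest ih =>
    intro gaps seen ingap
    rw [List.foldl_cons]
    cases x with
    | none =>
      cases h : (seen && !ingap) with
      | true =>
        have hs : pvStepA (gaps, seen, ingap) none = (gaps + 1, seen, true) := by
          simp [pvStepA, h]
        rw [hs, ih, pvEdges]
        simp
        ring
      | false =>
        have hs : pvStepA (gaps, seen, ingap) none = (gaps, seen, ingap) := by
          simp [pvStepA, h]
        rw [hs, ih, pvEdges, h]
        simp
    | some v =>
      have hs : pvStepA (gaps, seen, ingap) (some v) = (gaps, true, false) := by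
        simp [pvStepA]
      rw [hs, ih, pvEdges]
      simp

theorem pvZipEdges (rest : List (Option Int)) :
    ∀ (x : Option Int),
    (((x :: rest).zip rest).countP (fun p => p.1.isSome && p.2.isNone) : Int)
      = pvEdges x.isSome rest := by
  induction rest with
  | nil => intro x; simp [pvEdges]
  | cons y rest' ih =>
    intro x
    cases y with
    | none =>
      cases x with
      | none =>
        rw [show pvEdges (Option.isSome (none : Option Int)) (none :: rest')
              = pvEdges false rest' from by simp [pvEdges]]
        simpa [List.countP_cons] using ih none
      | some v =>
        rw [show pvEdges (Option.isSome (some v)) (none :: rest')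
              = 1 + pvEdges false rest' from by simp [pvEdges]]
        have h := ih none
        simp only [Option.isSome_none] at h
        simp [List.countP_cons, ← h]
        omega
    | some w =>
      rw [show pvEdges x.isSome (some w :: rest') = pvEdges true rest' from by
            cases x <;> simp [pvEdges]]
      simpa [List.countP_cons] using ih (some w)

theorem pvSliceTail (ids : List (Option Int)) :
    PySem.List.slice ids (some 1) none = ids.tail :=
  PySem.List.slice_from_one ids

-- ===== VERDICT (by name: the statement is the Claim_ definition above) =====
theorem gap_count_py_spec : Claim_equal_gap_count_py := by
  intro ids _
  show gap_count_py ids = gap_count_py_alt ids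
  unfold gap_count_py gap_count_py_alt
  rw [pvSliceTail, pvFoldA]
  cases ids with
  | nil => simp [pvEdges]
  | cons x rest =>
    cases x with
    | none =>
      have h : pvEdges (false && !false) (none :: rest) = pvEdges false rest := by
        simp [pvEdges]
      rw [h]
      simpa using (pvZipEdges rest none).symm
    | some v =>
      have h : pvEdges (false && !false) (some v :: rest) = pvEdges true rest := by
        simp [pvEdges]
      rw [h]
      simpa using (pvZipEdges rest (some v)).symm
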